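-- pv_equiv track=rewrite | github.com/An77C/ems-bom-flatten-tool | bom_excel_tool.py | _resolve_column_name
-- ===== SOURCE A (Python) =====
-- from typing import Any, Iterable, Sequence
--
-- def _resolve_column_name(columns: Sequence[str], preferred: str) -> str | None:
--     """先找完全相等，找不到再找開頭相符（忽略大小寫）。"""
--     preferred_lower = preferred.lower()
--     for col in columns:
--         if col.lower() == preferred_lower:
--             return col
--     for col in columns:
--         if col.lower().startswith(preferred_lower):
--             return col
--     return None
-- ===== SOURCE B (Python) =====
-- def _resolve_column_name(columns, preferred):
--     """Single pass: exact match returns immediately; first prefix match is remembered."""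
--     preferred_lower = preferred.lower()
--     prefix_match = None
--     for col in columns:
--         low = col.lower()
--         if low == preferred_lower:
--             return col
--         if prefix_match is None and low.startswith(preferred_lower):
--             prefix_match = col
--     return prefix_match
-- ===== Notes on version B (the rewrite author's own statement) =====
-- stated objective: alternative
-- what changed: Replaces A's two sequential scans (one for exact match, one for prefix match) with a single pass that returns on exact match and remembers the first prefix match in an accumulator.
import Mathlib
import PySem

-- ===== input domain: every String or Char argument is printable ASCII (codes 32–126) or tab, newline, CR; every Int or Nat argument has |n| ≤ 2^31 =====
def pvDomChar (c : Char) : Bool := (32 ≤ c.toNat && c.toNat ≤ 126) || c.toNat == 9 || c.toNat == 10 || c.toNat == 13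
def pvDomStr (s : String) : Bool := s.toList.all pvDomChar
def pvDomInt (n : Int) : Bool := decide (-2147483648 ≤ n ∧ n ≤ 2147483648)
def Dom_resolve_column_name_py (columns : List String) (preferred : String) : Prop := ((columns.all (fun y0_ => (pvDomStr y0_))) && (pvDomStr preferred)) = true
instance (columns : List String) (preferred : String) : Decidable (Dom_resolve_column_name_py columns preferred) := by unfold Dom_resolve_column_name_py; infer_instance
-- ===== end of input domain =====

-- B: one pass with a remembered first prefix match instead of A's two sequential scans (same return value; alternative decomposition).


-- ===== PORT A =====
def resolve_column_name_py (columns : List String) (preferred : String) : Option String :=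
  let preferred_lower := PySem.Str.lower preferred
  match columns.find? (fun col => PySem.Str.lower col == preferred_lower) with
  | some col => some col
  | none => columns.find? (fun col => PySem.Str.startswith (PySem.Str.lower col) preferred_lower)

-- ===== PORT B =====
def resolve_column_name_py_alt_loop (preferred_lower : String) : List String → Option String → Option String
  | [], prefix_match => prefix_match
  | col :: rest, prefix_match =>
    let low := PySem.Str.lower col
    if low == preferred_lower then some col
    else resolve_column_name_py_alt_loop preferred_lower rest
      (if prefix_match.isNone && PySem.Str.startswith low preferred_lower then some col else prefix_match)

def resolve_column_name_py_alt (columns : List String) (preferred : String) : Option String :=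
  resolve_column_name_py_alt_loop (PySem.Str.lower preferred) columns none

-- ===== PRECONDITION & SPEC =====
def Spec_resolve_column_name_py (columns : List String) (preferred : String) (out : Option String) : Prop := out = resolve_column_name_py_alt columns preferred
instance (columns : List String) (preferred : String) (out : Option String) : Decidable (Spec_resolve_column_name_py columns preferred out) := by unfold Spec_resolve_column_name_py; infer_instance

-- ===== CLAIM (what is proved, stated in full; the proofs are below) =====
def Claim_equal_resolve_column_name_py : Prop := ∀ (columns : List String) (preferred : String), Dom_resolve_column_name_py columns preferred → Spec_resolve_column_name_py columns preferred (resolve_column_name_py columns preferred)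

-- ===== LEMMAS AND PROOFS =====


theorem alt_loop_eq (pl : String) (cols : List String) (acc : Option String) :
    resolve_column_name_py_alt_loop pl cols acc =
      (match cols.find? (fun col => PySem.Str.lower col == pl) with
       | some col => some col
       | none =>
         match acc with
         | some a => some a
         | none => cols.find? (fun col => PySem.Str.startswith (PySem.Str.lower col) pl)) := by
  induction cols generalizing acc with
  | nil => cases acc <;> simp [resolve_column_name_py_alt_loop]
  | cons c cs ih =>
    simp only [resolve_column_name_py_alt_loop, List.find?_cons]
    by_cases h : (PySem.Str.lower c == pl) = true
    · simp [h]
    · simp only [h, Bool.false_eq_true, if_false]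
      rw [ih]
      cases acc with
      | some a => simp
      | none =>
        simp only [Option.isNone_none, Bool.true_and]
        cases cs.find? (fun col => PySem.Str.lower col == pl) <;>
          by_cases hs : PySem.Chars.startswith (PySem.Chars.lower c.toList) pl.toList = true <;>
            simp [hs]

-- ===== VERDICT (by name: the statement is the Claim_ definition above) =====
theorem resolve_column_name_py_spec : Claim_equal_resolve_column_name_py := by
  intro columns preferred _
  unfold Spec_resolve_column_name_py resolve_column_name_py resolve_column_name_py_alt
  rw [alt_loop_eq]
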